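-- pv_equiv track=rewrite | github.com/jmmichaud/BioinfoTools | CyclopeptideSequencing.py | CorrectedAAList
-- ===== SOURCE A (Python) =====
-- import copy
-- import collections
--
-- def CorrectedAAList(spectrum, M):
--     """Inputs a mass spectrum as a list of integers and an integer (M).
--     Generates a list of masses that represent the likely ammino acids present in
--     the spectra.  Uses all non-zero products when elements of spectrum are
--     subtracted from one another and a dictionary to count the number of times a
--     mass appears in the amended mass list.
--     Ouputs a list of  the top M masses (with ties) between 57-200 that appear a
--     minimum of M times in the convoluted mass list.
--     """
--     spectrum.sort(reverse = True)
--     convoluted = [] #generate convoluted mass list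
--     for i in range(0,len(spectrum)-1):
--         for j in range(i+1,len(spectrum)):
--             newmass = spectrum[i] - spectrum[j]
--             if newmass != 0:
--                 convoluted.append(newmass)
--     convoluted.sort()
--     cl = copy.deepcopy(convoluted) # Remove masses not between 57 - 200
--     for mass in cl:
--         if mass < 57 or mass > 200:
--             convoluted.remove(mass)
--     convolutedcountd = {} #create dictionary, convolutedcountd to count number of each score
--     for num in convoluted:
--         if num in convolutedcountd:
--             convolutedcountd[num] += 1
--         else:
--             convolutedcountd[num] = 1
--     scorelist = []
--     for key in convolutedcountd:
--         scorelist.append(convolutedcountd[key])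
--     scoredict = collections.OrderedDict(convolutedcountd) #Use set of masses and countdict to determine the number,C, of topscores to take
--     scoredict = sorted(scoredict.items(), key=lambda t: t[1], reverse = True)
--     scorelist.sort(reverse= True)
--     scoreset = list(set(scorelist))
--     scoreset.sort(reverse= True)
--     countdict = {}  #create another dictionary
--     for sco in scorelist:
--         if sco in countdict:
--             countdict[sco] += 1
--         else:
--             countdict[sco] = 1
--     Z = 0
--     C = 0
--     for sc in scoreset:#Find number of items you need from dictionary (C) for top N scores including ties
--         Z += countdict[sc]
--         if Z >= M:
--             C = Z
--             break
--     if C != Z: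
--         C = Z
--     L = 0
--     AAmasslist = []
--     for AAmass in scoredict:  #generate masses
--         if L < C:
--             AAmasslist.append(AAmass[0])
--             L += 1
--     AAmasslist.sort()
--     return AAmasslist
-- ===== SOURCE B (Python) =====
-- def CorrectedAAList(spectrum, M):
--     """Frequency-map convolution: counts each difference d in 57..200 as
--     sum over values v of freq[v]*freq[v-d], then keeps the masses whose count
--     reaches the cutoff score for the top M counts (with ties).
--     Note: unlike A, this does not sort `spectrum` in place."""
--     freq = {}
--     for x in spectrum:
--         freq[x] = freq.get(x, 0) + 1
--     cnt = {}
--     for d in range(57, 201):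
--         c = 0
--         for v, fv in freq.items():
--             c += fv * freq.get(v - d, 0)
--         if c:
--             cnt[d] = c
--     if not cnt:
--         return []
--     scores = sorted(set(cnt.values()), reverse=True)
--     thr = scores[-1]
--     total = 0
--     for s in scores:
--         total += sum(1 for c in cnt.values() if c == s)
--         if total >= M:
--             thr = s
--             break
--     return sorted(m for m, c in cnt.items() if c >= thr)
-- ===== Notes on version B (the rewrite author's own statement) =====
-- stated objective: faster
-- what changed: A sorts the spectrum and enumerates all O(n^2) index pairs to build, sort and prune a convolution list before counting; B never materialises that list: it builds a frequency map of the spectrum once and, for each difference d in 57..200, counts pairs as sum over v of freq[v]*freq[v-d], then picks the masses reaching the top-M-with-ties cutoff score directly by threshold filtering.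
import Mathlib
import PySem

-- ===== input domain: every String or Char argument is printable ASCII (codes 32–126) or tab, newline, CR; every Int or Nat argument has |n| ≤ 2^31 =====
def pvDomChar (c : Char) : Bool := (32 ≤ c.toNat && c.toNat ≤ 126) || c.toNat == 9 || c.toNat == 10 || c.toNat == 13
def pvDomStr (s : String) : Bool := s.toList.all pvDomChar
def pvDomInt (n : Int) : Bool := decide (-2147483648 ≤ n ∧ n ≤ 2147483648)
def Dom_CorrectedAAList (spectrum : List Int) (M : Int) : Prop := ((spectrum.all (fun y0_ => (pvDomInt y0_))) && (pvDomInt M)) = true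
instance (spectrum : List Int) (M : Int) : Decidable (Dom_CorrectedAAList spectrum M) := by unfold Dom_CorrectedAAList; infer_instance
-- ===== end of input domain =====

-- B replaces A's quadratic pairwise convolution by a frequency-map convolution over the 57..200
-- window and direct threshold selection; equivalence is about the RETURN value only (A sorts
-- `spectrum` in place, B does not mutate it).

-- ===== PORT A =====
-- the Z/C loop over scoreset with `break` (Z accumulated, C set at the break)
def aLoopZC (countdict : PySem.Dict Int Int) (M : Int) : List Int → Int → Int × Int
  | [], Z => (Z, 0)
  | sc :: scoreset, Z =>
    let Z' := Z + countdict.getD sc 0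
    if Z' ≥ M then (Z', Z') else aLoopZC countdict M scoreset Z'

def CorrectedAAList (spectrum : List Int) (M : Int) : List Int :=
  -- spectrum.sort(reverse=True)  (in-place in Python)
  let spectrum := PySem.List.sorted spectrum (fun x => x) true
  -- nested index loops building `convoluted`
  let convoluted : List Int :=
    (PySem.List.pyRange 0 (PySem.List.len spectrum - 1)).foldl (fun conv i =>
      (PySem.List.pyRange (i + 1) (PySem.List.len spectrum)).foldl (fun conv j =>
        let newmass := PySem.List.pyGetD spectrum i 0 - PySem.List.pyGetD spectrum j 0
        if newmass ≠ 0 then conv ++ [newmass] else conv) conv) []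
  let convoluted := PySem.List.sorted convoluted (fun x => x)
  let cl := convoluted  -- copy.deepcopy(convoluted)
  -- for mass in cl: if out of range: convoluted.remove(mass)   (remove never fails here)
  let convoluted := cl.foldl (fun conv mass =>
    if mass < 57 ∨ mass > 200 then (PySem.List.remove? conv mass).getD conv else conv) convoluted
  let convolutedcountd := convoluted.foldl (fun d num =>
    if d.contains num then d.modify num 0 (· + 1) else d.insert num 1) PySem.Dict.empty
  -- for key in convolutedcountd: scorelist.append(convolutedcountd[key])
  let scorelist := convolutedcountd.keys.foldl (fun acc key => acc ++ [convolutedcountd.getD key 0]) []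
  let scoredict := PySem.List.sorted convolutedcountd.items (fun t => t.2) true
  let scorelist := PySem.List.sorted scorelist (fun x => x) true
  -- scoreset = list(set(scorelist)); scoreset.sort(reverse=True)
  let scoreset := PySem.List.sorted (PySem.Set.ofList scorelist) (fun x => x) true
  let countdict := scorelist.foldl (fun d sco =>
    if d.contains sco then d.modify sco 0 (· + 1) else d.insert sco 1) PySem.Dict.empty
  let ZC := aLoopZC countdict M scoreset 0
  let C := if ZC.2 ≠ ZC.1 then ZC.1 else ZC.2
  -- for AAmass in scoredict: if L < C: append AAmass[0]
  let LA := scoredict.foldl (fun (p : Int × List Int) AAmass =>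
    if p.1 < C then (p.1 + 1, p.2 ++ [AAmass.1]) else p) ((0 : Int), ([] : List Int))
  PySem.List.sorted LA.2 (fun x => x)

-- ===== PORT B =====
-- the threshold loop over `scores` with `break`
def bLoopThr (values : List Int) (M : Int) : List Int → Int → Int → Int
  | [], _total, thr => thr
  | s :: scores, total, thr =>
    let total' := total + (values.count s : Int)
    if total' ≥ M then s else bLoopThr values M scores total' thr

def CorrectedAAList_alt (spectrum : List Int) (M : Int) : List Int :=
  let freq := spectrum.foldl (fun d x => d.insert x (d.getD x 0 + 1)) PySem.Dict.empty
  let cnt := (PySem.List.pyRange 57 201).foldl (fun cnt d =>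
    let c := freq.items.foldl (fun c p => c + p.2 * freq.getD (p.1 - d) 0) (0 : Int)
    if c ≠ 0 then cnt.insert d c else cnt) PySem.Dict.empty
  if cnt.items.isEmpty then []
  else
    let scores := PySem.List.sorted (PySem.Set.ofList cnt.values) (fun x => x) true
    let thr := bLoopThr cnt.values M scores 0 (PySem.List.pyGetD scores (-1) 0)
    PySem.List.sorted ((cnt.items.filter (fun p => p.2 ≥ thr)).map (fun p => p.1)) (fun x => x)

-- ===== PRECONDITION & SPEC =====
def Spec_CorrectedAAList (spectrum : List Int) (M : Int) (out : List Int) : Prop := out = CorrectedAAList_alt spectrum M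
instance (spectrum : List Int) (M : Int) (out : List Int) : Decidable (Spec_CorrectedAAList spectrum M out) := by unfold Spec_CorrectedAAList; infer_instance

-- ===== CLAIM (what is proved, stated in full; the proofs are below) =====
def Claim_equal_CorrectedAAList : Prop := ∀ (spectrum : List Int) (M : Int), Dom_CorrectedAAList spectrum M → Spec_CorrectedAAList spectrum M (CorrectedAAList spectrum M)

-- ===== LEMMAS AND PROOFS =====

-- the list of all nonzero differences l[i]-l[j], i<j, in A's traversal order
def pvConv : List Int → List Int
  | [] => []
  | x :: t => ((t.map (fun y => x - y)).filter (fun z => decide (z ≠ 0))) ++ pvConv t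

-- B's convolution count: number of ordered pairs of elements of sp at difference d
def pvCntB (sp : List Int) (d : Int) : Int :=
  ((PySem.Set.ofList sp).map (fun v => (sp.count v : Int) * (sp.count (v - d) : Int))).sum

-- A's double index loop equals pvConv
theorem pvConv_outer : ∀ (l : List Int) (acc : List Int),
    (List.range (l.length - 1)).foldl (fun a i =>
      a ++ ((l.drop (i + 1)).map (fun y => l.getD i 0 - y)).filter (fun z => decide (z ≠ 0))) acc
    = acc ++ pvConv l := by
  intro l
  induction l with
  | nil => intro acc; simp [pvConv]
  | cons x t ih =>
    intro acc
    simp only [List.length_cons, Nat.add_sub_cancel]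
    cases t with
    | nil => simp [pvConv]
    | cons y u =>
      have hlen : (y :: u).length = u.length + 1 := by simp
      rw [hlen, List.range_succ_eq_map, List.foldl_cons, List.foldl_map]
      have hshift : ∀ (a : List Int), ∀ i ∈ List.range u.length,
          (fun (a : List Int) (i : Nat) =>
            a ++ (((x :: y :: u).drop (i + 1)).map (fun w => (x :: y :: u).getD i 0 - w)).filter
              (fun z => decide (z ≠ 0))) a i.succ
          = (fun (a : List Int) (i : Nat) =>
            a ++ (((y :: u).drop (i + 1)).map (fun w => (y :: u).getD i 0 - w)).filter
              (fun z => decide (z ≠ 0))) a i := by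
        intro a i _
        rfl
      rw [PySem.List.foldl_congr_mem _ _ _ _ hshift]
      have hu : u.length = (y :: u).length - 1 := by simp
      rw [hu, ih]
      show (acc ++ _) ++ pvConv (y :: u) = acc ++ pvConv (x :: y :: u)
      rw [List.append_assoc]
      rfl

theorem pvConv_port (l : List Int) :
    (PySem.List.pyRange 0 (PySem.List.len l - 1)).foldl (fun conv i =>
      (PySem.List.pyRange (i + 1) (PySem.List.len l)).foldl (fun conv j =>
        let newmass := PySem.List.pyGetD l i 0 - PySem.List.pyGetD l j 0
        if newmass ≠ 0 then conv ++ [newmass] else conv) conv) []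
    = pvConv l := by
  cases hl : l with
  | nil => rfl
  | cons a as =>
    rw [← hl]
    have hlen : 1 ≤ l.length := by rw [hl]; simp
    have h1 : PySem.List.len l - 1 = ((l.length - 1 : Nat) : Int) := by
      simp only [PySem.List.len]
      push_cast [hlen]
      ring
    rw [h1, PySem.List.pyRange_zero_nat, List.foldl_map]
    have hbody : ∀ (acc : List Int), ∀ i ∈ List.range (l.length - 1),
        (fun (conv : List Int) (i : Int) =>
          (PySem.List.pyRange (i + 1) (PySem.List.len l)).foldl (fun conv j =>
            let newmass := PySem.List.pyGetD l i 0 - PySem.List.pyGetD l j 0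
            if newmass ≠ 0 then conv ++ [newmass] else conv) conv) acc (i : Int)
        = acc ++ ((l.drop (i + 1)).map (fun y => l.getD i 0 - y)).filter
            (fun z => decide (z ≠ 0)) := by
      intro acc i _
      show (PySem.List.pyRange ((i : Int) + 1) (PySem.List.len l)).foldl _ acc = _
      have hcast : ((i : Int) + 1) = ((i + 1 : Nat) : Int) := by push_cast; ring
      rw [hcast,
        PySem.List.foldl_pyRange_pyGetD l 0
          (fun conv v =>
            if PySem.List.pyGetD l (i : Int) 0 - v ≠ 0
            then conv ++ [PySem.List.pyGetD l (i : Int) 0 - v] else conv)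
          acc (by positivity)]
      simp only [Int.toNat_natCast, PySem.List.pyGetD_natCast]
      have hfun : (fun (conv : List Int) (v : Int) =>
            if l.getD i 0 - v ≠ 0 then conv ++ [l.getD i 0 - v] else conv)
          = (fun (conv : List Int) (v : Int) =>
            if (fun y => decide (l.getD i 0 - y ≠ 0)) v = true
            then conv ++ [(fun y => l.getD i 0 - y) v] else conv) := by
        funext c v
        simp
      rw [hfun, PySem.List.foldl_append_if, List.filter_map]
      rfl
    rw [PySem.List.foldl_congr_mem _ _ _ _ hbody]
    rw [pvConv_outer l []]
    rfl

-- erase of an element satisfying q commutes with filtering by q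
theorem pvFilterErase (q : Int → Bool) (m : Int) (hq : q m = true) : ∀ (acc : List Int),
    (acc.erase m).filter q = (acc.filter q).erase m := by
  intro acc
  induction acc with
  | nil => simp
  | cons a r ih =>
    rw [List.erase_cons]
    by_cases ha : a = m
    · subst ha
      simp [hq]
    · have hne : ¬ (a == m) = true := by simp [ha]
      rw [if_neg hne, List.filter_cons]
      by_cases hqa : q a = true
      · simp only [hqa, if_pos trivial]
        rw [List.filter_cons]
        simp only [hqa, if_pos trivial]
        rw [List.erase_cons, if_neg hne, ih]
      · simp only [hqa]
        rw [List.filter_cons]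
        simp only [hqa]
        simp only [Bool.false_eq_true, if_false]
        exact ih

-- erasing an element that fails q leaves the q-filter unchanged
theorem pvFilterEraseNot (q : Int → Bool) (m : Int) (hq : q m = false) : ∀ (acc : List Int),
    (acc.erase m).filter q = acc.filter q := by
  intro acc
  induction acc with
  | nil => simp
  | cons a r ih =>
    rw [List.erase_cons]
    by_cases ha : a = m
    · subst ha
      rw [if_pos (by simp)]
      rw [List.filter_cons]
      simp [hq]
    · have hne : ¬ (a == m) = true := by simp [ha]
      rw [if_neg hne, List.filter_cons, List.filter_cons, ih]

-- the remove loop computes a filter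
theorem pvRemoveFold (p : Int → Prop) [DecidablePred p] : ∀ (l acc : List Int),
    (l.filter (fun m => decide (p m))).Perm (acc.filter (fun m => decide (p m))) →
    l.foldl (fun a m => if p m then (PySem.List.remove? a m).getD a else a) acc
      = acc.filter (fun m => decide (¬ p m)) := by
  intro l
  induction l with
  | nil =>
    intro acc hperm
    simp only [List.filter_nil] at hperm
    have hnil : acc.filter (fun m => decide (p m)) = [] := (List.perm_nil.mp hperm.symm)
    have hall := List.filter_eq_nil_iff.mp hnil
    simp only [List.foldl_nil]
    symm
    apply List.filter_eq_self.mpr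
    intro a ha
    have := hall a ha
    simpa using this
  | cons m t ih =>
    intro acc hperm
    simp only [List.foldl_cons]
    by_cases hm : p m
    · rw [if_pos hm]
      have hperm' : (m :: t.filter (fun m => decide (p m))).Perm
          (acc.filter (fun m => decide (p m))) := by
        simpa [List.filter_cons, hm] using hperm
      obtain ⟨hmem, hperm2⟩ := List.cons_perm_iff_perm_erase.mp hperm'
      have hmacc : m ∈ acc := List.mem_of_mem_filter hmem
      have hrem : (PySem.List.remove? acc m).getD acc = acc.erase m := by
        simp only [PySem.List.remove?]
        cases hidx : List.idxOf? m acc with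
        | none => exact absurd hmacc (List.idxOf?_eq_none_iff.mp hidx)
        | some i =>
          simp only [Option.map_some, Option.getD_some]
          rw [List.erase_eq_eraseIdx, hidx]
      rw [hrem]
      have hqd : (fun m => decide (p m)) m = true := by simpa using hm
      have hef : (acc.erase m).filter (fun m => decide (p m))
          = (acc.filter (fun m => decide (p m))).erase m :=
        pvFilterErase _ m hqd acc
      have heg : (acc.erase m).filter (fun m => decide (¬ p m))
          = acc.filter (fun m => decide (¬ p m)) :=
        pvFilterEraseNot _ m (by simpa using hm) acc
      rw [ih (acc.erase m) (by rw [hef]; exact hperm2), heg]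
    · rw [if_neg hm]
      have hperm' : (t.filter (fun m => decide (p m))).Perm
          (acc.filter (fun m => decide (p m))) := by
        simpa [List.filter_cons, hm] using hperm
      exact ih acc hperm'

-- A's counting loop is Counter
theorem pvCountFold (l : List Int) :
    l.foldl (fun d num => if d.contains num then d.modify num 0 (· + 1) else d.insert num 1)
      PySem.Dict.empty = PySem.Dict.counter l := by
  have hstep : ∀ (d : PySem.Dict Int Int) (x : Int),
      (if d.contains x then d.modify x 0 (· + 1) else d.insert x 1) = d.modify x 0 (· + 1) := by
    intro d x
    by_cases h : d.contains x
    · simp [h]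
    · have hget : d.get? x = none := by
        simp only [PySem.Dict.contains, List.any_eq_true, not_exists, not_and,
          Bool.not_eq_true] at h
        simp only [PySem.Dict.get?, Option.map_eq_none_iff]
        apply List.find?_eq_none.mpr
        intro p hp
        simp at h
        simp [h p.1 p.2 hp]
      simp [h, PySem.Dict.modify, PySem.Dict.getD, hget]
  rw [PySem.List.foldl_congr_mem _ _ _ _ (fun acc x _ => hstep acc x)]
  rfl

-- lookup of a present key in a dict with nodup keys
theorem pvFindKeys (ps : List (Int × Int)) (p : Int × Int)
    (h : (ps.map Prod.fst).Nodup) (hp : p ∈ ps) :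
    ps.find? (fun q => q.1 == p.1) = some p := by
  induction ps with
  | nil => cases hp
  | cons q t ih =>
    simp only [List.map_cons, List.nodup_cons] at h
    obtain ⟨hq1, ht⟩ := h
    rcases List.mem_cons.mp hp with rfl | hp'
    · have hpos := List.find?_cons_of_pos (l := t) (a := p)
        (p := fun r => r.1 == p.1) (by simp)
      rw [hpos]
    · have hne : ¬ (q.1 == p.1) = true := by
        simp only [beq_iff_eq]
        intro he
        exact hq1 (he ▸ List.mem_map_of_mem hp')
      have hneg := List.find?_cons_of_neg (l := t) (a := q)
        (p := fun r => r.1 == p.1) hne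
      rw [hneg]
      exact ih ht hp'

theorem pvGetDItems (d : PySem.Dict Int Int) (p : Int × Int)
    (h : (d.items.map Prod.fst).Nodup) (hp : p ∈ d.items) :
    d.getD p.1 0 = p.2 := by
  simp only [PySem.Dict.getD, PySem.Dict.get?, pvFindKeys d.items p h hp,
    Option.map_some, Option.getD_some]

-- the scorelist loop produces the dict's values
theorem pvKeysFold (d : PySem.Dict Int Int) (h : (d.items.map Prod.fst).Nodup) :
    d.keys.foldl (fun acc key => acc ++ [d.getD key 0]) [] = d.values := by
  rw [PySem.List.foldl_append_singleton_eq_map]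
  simp only [PySem.Dict.keys, PySem.Dict.values, List.map_map, List.nil_append]
  apply List.map_congr_left
  intro p hp
  exact pvGetDItems d p h hp

-- counting split at a threshold
theorem pvCountPSplit (V : List Int) (s : Int) :
    V.countP (fun v => decide (s < v)) + V.count s = V.countP (fun v => decide (s ≤ v)) := by
  induction V with
  | nil => simp
  | cons v t ih =>
    by_cases h1 : s < v <;> by_cases h3 : s ≤ v <;> by_cases h2 : v = s <;>
      simp [h1, h2, h3] <;> omega

-- the two break-loops agree: A's final Z is the number of values ≥ B's threshold
theorem pvSel (V : List Int) (M : Int) (cd : PySem.Dict Int Int) : ∀ (S : List Int) (Z : Int),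
    S.Pairwise (· > ·) →
    (∀ s ∈ S, cd.getD s 0 = (V.count s : Int)) →
    (∀ v ∈ V, v ∈ S ∨ ∀ s ∈ S, s < v) →
    Z = (V.countP (fun v => decide (∀ s ∈ S, s < v)) : Int) →
    ∀ hS : S ≠ [],
    (aLoopZC cd M S Z).1
      = (V.countP (fun v => decide (bLoopThr V M S Z (S.getLast hS) ≤ v)) : Int) := by
  intro S
  induction S with
  | nil => intro Z _ _ _ _ hS; exact absurd rfl hS
  | cons s rest ih =>
    intro Z hpw hc h2 h3 hS
    rcases List.pairwise_cons.mp hpw with ⟨hs, hrest⟩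
    have hcs : cd.getD s 0 = (V.count s : Int) := hc s (List.mem_cons_self ..)
    have hZ : Z = (V.countP (fun v => decide (s < v)) : Int) := by
      rw [h3]
      congr 1
      apply List.countP_congr
      intro v _
      simp only [decide_eq_true_eq]
      constructor
      · intro h; exact h s (List.mem_cons_self ..)
      · intro h t htmem
        rcases List.mem_cons.mp htmem with rfl | htm
        · exact h
        · exact lt_trans (hs t htm) h
    have hZ' : Z + cd.getD s 0 = (V.countP (fun v => decide (s ≤ v)) : Int) := by
      rw [hZ, hcs]
      exact_mod_cast congrArg (Nat.cast : Nat → Int) (pvCountPSplit V s)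
    have hunfoldB : ∀ (thr0 : Int), bLoopThr V M (s :: rest) Z thr0
        = if Z + (V.count s : Int) ≥ M then s
          else bLoopThr V M rest (Z + (V.count s : Int)) thr0 := fun _ => rfl
    have hunfoldA : aLoopZC cd M (s :: rest) Z
        = if Z + cd.getD s 0 ≥ M then (Z + cd.getD s 0, Z + cd.getD s 0)
          else aLoopZC cd M rest (Z + cd.getD s 0) := rfl
    by_cases hbr : Z + cd.getD s 0 ≥ M
    · have hbr2 : Z + (V.count s : Int) ≥ M := by rw [← hcs]; exact hbr
      have hb : bLoopThr V M (s :: rest) Z ((s :: rest).getLast hS) = s := by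
        rw [hunfoldB, if_pos hbr2]
      have ha : (aLoopZC cd M (s :: rest) Z).1 = Z + cd.getD s 0 := by
        rw [hunfoldA, if_pos hbr]
      rw [ha, hb]
      exact hZ'
    · have hbr2 : ¬ (Z + (V.count s : Int) ≥ M) := by rw [← hcs]; exact hbr
      have hb : bLoopThr V M (s :: rest) Z ((s :: rest).getLast hS)
          = bLoopThr V M rest (Z + (V.count s : Int)) ((s :: rest).getLast hS) := by
        rw [hunfoldB, if_neg hbr2]
      have ha : aLoopZC cd M (s :: rest) Z = aLoopZC cd M rest (Z + cd.getD s 0) := by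
        rw [hunfoldA, if_neg hbr]
      rw [ha, hb]
      by_cases hre : rest = []
      · subst hre
        have hlast : (s :: ([] : List Int)).getLast hS = s := rfl
        rw [hlast]
        have hb2 : bLoopThr V M [] (Z + (V.count s : Int)) s = s := rfl
        rw [hb2]
        have ha2 : (aLoopZC cd M [] (Z + cd.getD s 0)).1 = Z + cd.getD s 0 := rfl
        rw [ha2]
        exact hZ'
      · have hlast : (s :: rest).getLast hS = rest.getLast hre := List.getLast_cons hre
        have h2' : ∀ v ∈ V, v ∈ rest ∨ ∀ t ∈ rest, t < v := by
          intro v hv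
          rcases h2 v hv with hvS | hgt
          · rcases List.mem_cons.mp hvS with rfl | hvr
            · exact Or.inr (fun t htm => hs t htm)
            · exact Or.inl hvr
          · exact Or.inr (fun t htm => hgt t (List.mem_cons_of_mem _ htm))
        have h3' : Z + cd.getD s 0
            = (V.countP (fun v => decide (∀ t ∈ rest, t < v)) : Int) := by
          rw [hZ']
          congr 1
          apply List.countP_congr
          intro v hv
          simp only [decide_eq_true_eq]
          constructor
          · intro hsv t htm
            exact lt_of_lt_of_le (hs t htm) hsv
          · intro hall
            rcases h2 v hv with hvS | hgt
            · rcases List.mem_cons.mp hvS with rfl | hvr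
              · exact le_refl v
              · exact absurd (hall v hvr) (lt_irrefl v)
            · exact le_of_lt (hgt s (List.mem_cons_self ..))
        rw [hlast]
        have := ih (Z + cd.getD s 0) hrest
          (fun t htm => hc t (List.mem_cons_of_mem _ htm)) h2' h3' hre
        rw [this]
        congr 2
        rw [← hcs]

-- A's final L/C loop is take
theorem pvTakeFold (C : Int) : ∀ (xs : List (Int × Int)) (L : Int) (acc : List Int),
    (xs.foldl (fun p q => if p.1 < C then (p.1 + 1, p.2 ++ [q.1]) else p) (L, acc)).2
      = acc ++ (xs.take (C - L).toNat).map Prod.fst := by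
  intro xs
  induction xs with
  | nil => intro L acc; simp
  | cons q t ih =>
    intro L acc
    simp only [List.foldl_cons]
    by_cases h : L < C
    · rw [if_pos h, ih (L + 1) (acc ++ [q.1])]
      have ht : (C - L).toNat = (C - (L + 1)).toNat + 1 := by omega
      rw [ht, List.take_succ_cons, List.map_cons]
      simp
    · rw [if_neg h, ih L acc]
      have ht : (C - L).toNat = 0 := by omega
      simp [ht]

-- taking the count of a down-closed predicate from a value-descending list is filtering
theorem pvTakeFilter (thr : Int) : ∀ (xs : List (Int × Int)), xs.Pairwise (fun a b => b.2 ≤ a.2) →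
    xs.take (xs.countP (fun q => decide (thr ≤ q.2))) = xs.filter (fun q => decide (thr ≤ q.2)) := by
  intro xs
  induction xs with
  | nil => intro _; simp
  | cons q t ih =>
    intro hp
    rcases List.pairwise_cons.mp hp with ⟨hq, ht⟩
    by_cases h : thr ≤ q.2
    · have hc : (q :: t).countP (fun q => decide (thr ≤ q.2))
          = t.countP (fun q => decide (thr ≤ q.2)) + 1 := by
        simp [h]
      rw [hc, List.take_succ_cons, ih ht]
      simp [h]
    · have hall : ∀ r ∈ t, ¬ (thr ≤ r.2) := fun r hr hle => h (le_trans hle (hq r hr))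
      have h0 : t.countP (fun q => decide (thr ≤ q.2)) = 0 := by
        apply List.countP_eq_zero.mpr
        intro r hr
        simpa using hall r hr
      have hc : (q :: t).countP (fun q => decide (thr ≤ q.2)) = 0 := by
        simp [h, h0]
      have hfil : t.filter (fun q => decide (thr ≤ q.2)) = [] := by
        apply List.filter_eq_nil_iff.mpr
        intro r hr
        simpa using hall r hr
      rw [hc]
      simp [h, hfil]

-- B's insertion loop over fresh increasing keys
theorem pvInsFold (c : Int → Int) : ∀ (L : List Int) (dd : PySem.Dict Int Int),
    (∀ d ∈ L, dd.contains d = false) → L.Nodup →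
    (L.foldl (fun dd d => if c d ≠ 0 then dd.insert d (c d) else dd) dd).items
      = dd.items ++ (L.filter (fun d => decide (c d ≠ 0))).map (fun d => (d, c d)) := by
  intro L
  induction L with
  | nil => intro dd _ _; simp
  | cons d t ih =>
    intro dd hfresh hnd
    rcases List.nodup_cons.mp hnd with ⟨hdt, hnd'⟩
    have hcd : dd.contains d = false := hfresh d (List.mem_cons_self ..)
    simp only [List.foldl_cons]
    by_cases hc : c d ≠ 0
    · rw [if_pos hc]
      have hins : (dd.insert d (c d)).items = dd.items ++ [(d, c d)] := by
        simp [PySem.Dict.insert, hcd]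
      have hfresh' : ∀ x ∈ t, (dd.insert d (c d)).contains x = false := by
        intro x hx
        have hxd : ¬ (d = x) := fun hh => hdt (hh ▸ hx)
        have hfx := hfresh x (List.mem_cons_of_mem _ hx)
        simp only [PySem.Dict.contains, hins, List.any_append, Bool.or_eq_false_iff]
        constructor
        · simpa only [PySem.Dict.contains] using hfx
        · simp [hxd]
      rw [ih (dd.insert d (c d)) hfresh' hnd', hins]
      simp [hc, List.append_assoc]
    · rw [if_neg hc]
      rw [ih dd (fun x hx => hfresh x (List.mem_cons_of_mem _ hx)) hnd']
      simp [hc]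

-- sum over a nodup list of an indicator
theorem pvSumIte (x : Int) (g : Int → Nat) : ∀ (D : List Int), D.Nodup → x ∈ D →
    (D.map (fun v => if x = v then g v else 0)).sum = g x := by
  intro D
  induction D with
  | nil => intro _ hx; cases hx
  | cons v t ih =>
    intro hD hx
    rcases List.nodup_cons.mp hD with ⟨hv, ht⟩
    simp only [List.map_cons, List.sum_cons]
    by_cases hxy : x = v
    · subst hxy
      have hz : (t.map (fun w => if x = w then g w else 0)).sum = 0 := by
        apply List.sum_eq_zero
        intro y hy
        rcases List.mem_map.mp hy with ⟨w, hw, rfl⟩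
        rcases eq_or_ne x w with rfl | hne
        · exact absurd hw hv
        · simp [hne]
      simp [hz]
    · have hx' : x ∈ t := by
        rcases List.mem_cons.mp hx with h | h
        · exact absurd h hxy
        · exact h
      rw [if_neg hxy, ih ht hx']
      omega

-- grouping a sum by value
theorem pvGroup (g : Int → Nat) : ∀ (l D : List Int), D.Nodup → (∀ x ∈ l, x ∈ D) →
    (l.map g).sum = (D.map (fun v => l.count v * g v)).sum := by
  intro l
  induction l with
  | nil =>
    intro D _ _
    simp only [List.map_nil, List.sum_nil, List.count_nil]
    symm; apply List.sum_eq_zero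
    intro y hy
    rcases List.mem_map.mp hy with ⟨w, _, rfl⟩
    simp
  | cons x t ih =>
    intro D hD hmem
    have hx : x ∈ D := hmem x (List.mem_cons_self ..)
    simp only [List.map_cons, List.sum_cons]
    have hcnt : ∀ v : Int, (x :: t).count v = t.count v + (if x = v then 1 else 0) := by
      intro v
      rw [List.count_cons]
      by_cases h : x = v <;> simp [h]
    calc g x + (t.map g).sum
        = g x + (D.map (fun v => t.count v * g v)).sum := by
          rw [ih D hD (fun y hy => hmem y (List.mem_cons_of_mem _ hy))]
      _ = (D.map (fun v => (if x = v then g v else 0))).sum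
            + (D.map (fun v => t.count v * g v)).sum := by
          rw [pvSumIte x g D hD hx]
      _ = (D.map (fun v => (x :: t).count v * g v)).sum := by
          rw [← List.sum_map_add]
          apply congrArg
          apply List.map_congr_left
          intro v _
          rw [hcnt v]
          by_cases h : x = v <;> simp [h] <;> ring

-- pair count on a descending list
theorem pvConvCount (d : Int) (hd : 0 < d) : ∀ (l : List Int), l.Pairwise (fun a b => b ≤ a) →
    (pvConv l).count d = (l.map (fun x => l.count (x - d))).sum := by
  intro l
  induction l with
  | nil => intro _; simp [pvConv]
  | cons x t ih =>
    intro hp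
    rcases List.pairwise_cons.mp hp with ⟨hx, ht⟩
    simp only [pvConv, List.count_append, List.map_cons, List.sum_cons]
    have hd0 : (decide (d ≠ 0)) = true := by simp; omega
    have h1 : ((t.map (fun y => x - y)).filter (fun z => decide (z ≠ 0))).count d
        = t.count (x - d) := by
      have hcf := List.count_filter (p := fun z => decide (z ≠ 0)) (a := d)
        (l := t.map (fun y => x - y)) hd0
      rw [hcf, List.count_eq_countP, List.countP_map, List.count_eq_countP]
      apply List.countP_congr
      intro y _
      simp only [Function.comp_apply, beq_iff_eq]
      omega
    have h2 : (x :: t).count (x - d) = t.count (x - d) := by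
      rw [List.count_cons]
      have hne : ¬ (x == x - d) = true := by simp; omega
      simp [hne]
    have h3 : t.map (fun z => (x :: t).count (z - d)) = t.map (fun z => t.count (z - d)) := by
      apply List.map_congr_left
      intro z hz
      rw [List.count_cons]
      have hne : ¬ (x == z - d) = true := by
        simp only [beq_iff_eq]
        have := hx z hz
        omega
      simp [hne]
    rw [h1, h2, h3, ih ht]

-- Set.ofList is a sublist
theorem pvOfListSublist : ∀ (xs acc : List Int), (xs.foldl PySem.Set.add acc).Sublist (acc ++ xs) := by
  intro xs
  induction xs with
  | nil => intro acc; simp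
  | cons x t ih =>
    intro acc
    simp only [List.foldl_cons]
    by_cases h : PySem.Set.contains acc x
    · have hadd : PySem.Set.add acc x = acc := by
        unfold PySem.Set.add
        rw [if_pos h]
      rw [hadd]
      exact (ih acc).trans (List.Sublist.append_left (List.sublist_cons_self x t) acc)
    · have hadd : PySem.Set.add acc x = acc ++ [x] := by
        unfold PySem.Set.add
        rw [if_neg h]
      rw [hadd]
      have := ih (acc ++ [x])
      simpa [List.append_assoc] using this

-- the counts agree on the window
theorem pvMainCount (sp : List Int) (d : Int) (h1 : 57 ≤ d) (h2 : d ≤ 200) :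
    pvCntB sp d
      = (((PySem.List.sorted (pvConv (PySem.List.sorted sp (fun x => x) true)) (fun x => x)).filter
          (fun m => decide (¬ (m < 57 ∨ m > 200)))).count d : Int) := by
  have hd0 : (0 : Int) < d := by omega
  have hpair : (PySem.List.sorted sp (fun x => x) true).Pairwise (fun a b => b ≤ a) :=
    PySem.List.sorted_pairwise_rev sp (fun x => x)
  have hperm : (PySem.List.sorted sp (fun x => x) true).Perm sp :=
    PySem.List.sorted_perm sp (fun x => x) true
  have hprd : (fun m => decide (¬ (m < 57 ∨ m > 200))) d = true := by simp; omega
  have h1 : ((PySem.List.sorted (pvConv (PySem.List.sorted sp (fun x => x) true)) (fun x => x)).filter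
        (fun m => decide (¬ (m < 57 ∨ m > 200)))).count d
      = (pvConv (PySem.List.sorted sp (fun x => x) true)).count d := by
    have hcf := List.count_filter (p := fun m => decide (¬ (m < 57 ∨ m > 200))) (a := d)
      (l := PySem.List.sorted (pvConv (PySem.List.sorted sp (fun x => x) true)) (fun x => x)) hprd
    rw [hcf]
    exact (PySem.List.sorted_perm _ _ _).count_eq d
  rw [h1, pvConvCount d hd0 _ hpair,
    pvGroup (fun x => (PySem.List.sorted sp (fun x => x) true).count (x - d)) _
      (PySem.Set.ofList (PySem.List.sorted sp (fun x => x) true))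
      (PySem.Set.nodup_ofList _)
      (fun x hx => (PySem.Set.mem_ofList _ x).mpr hx)]
  have hmapeq : (PySem.Set.ofList (PySem.List.sorted sp (fun x => x) true)).map
        (fun v => (PySem.List.sorted sp (fun x => x) true).count v
          * (PySem.List.sorted sp (fun x => x) true).count (v - d))
      = (PySem.Set.ofList (PySem.List.sorted sp (fun x => x) true)).map
        (fun v => sp.count v * sp.count (v - d)) := by
    apply List.map_congr_left
    intro v _
    rw [hperm.count_eq, hperm.count_eq]
  have hof : (PySem.Set.ofList (PySem.List.sorted sp (fun x => x) true)).Perm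
      (PySem.Set.ofList sp) := by
    rw [List.perm_ext_iff_of_nodup (PySem.Set.nodup_ofList _) (PySem.Set.nodup_ofList _)]
    intro a
    rw [PySem.Set.mem_ofList, PySem.Set.mem_ofList]
    exact hperm.mem_iff
  have hsum := (hof.map (fun v => sp.count v * sp.count (v - d))).sum_eq
  rw [hmapeq, hsum]
  simp only [pvCntB, Nat.cast_list_sum, List.map_map]
  apply congrArg List.sum
  apply List.map_congr_left
  intro v _
  simp only [Function.comp_apply]
  push_cast
  ring

-- the two dicts have the same items
theorem pvItemsEq (sp : List Int) :
    (PySem.Dict.counter ((PySem.List.sorted (pvConv (PySem.List.sorted sp (fun x => x) true)) (fun x => x)).filter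
        (fun m => decide (¬ (m < 57 ∨ m > 200))))).items
      = ((PySem.List.pyRange 57 201).filter (fun d => decide (pvCntB sp d ≠ 0))).map
          (fun d => (d, pvCntB sp d)) := by
  have hFle : ((PySem.List.sorted (pvConv (PySem.List.sorted sp (fun x => x) true)) (fun x => x)).filter
      (fun m => decide (¬ (m < 57 ∨ m > 200)))).Pairwise (· ≤ ·) :=
    (PySem.List.sorted_pairwise _ (fun x => x)).filter _
  have hKAsub : (PySem.Set.ofList ((PySem.List.sorted (pvConv (PySem.List.sorted sp (fun x => x) true)) (fun x => x)).filter
      (fun m => decide (¬ (m < 57 ∨ m > 200))))).Sublist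
      ((PySem.List.sorted (pvConv (PySem.List.sorted sp (fun x => x) true)) (fun x => x)).filter
      (fun m => decide (¬ (m < 57 ∨ m > 200)))) := by
    have := pvOfListSublist ((PySem.List.sorted (pvConv (PySem.List.sorted sp (fun x => x) true)) (fun x => x)).filter
      (fun m => decide (¬ (m < 57 ∨ m > 200)))) []
    simpa using this
  have hKAlt : (PySem.Set.ofList ((PySem.List.sorted (pvConv (PySem.List.sorted sp (fun x => x) true)) (fun x => x)).filter
      (fun m => decide (¬ (m < 57 ∨ m > 200))))).Pairwise (· < ·) := by
    have hle := hFle.sublist hKAsub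
    have hne := PySem.Set.nodup_ofList ((PySem.List.sorted (pvConv (PySem.List.sorted sp (fun x => x) true)) (fun x => x)).filter
      (fun m => decide (¬ (m < 57 ∨ m > 200))))
    exact (hle.and hne).imp (fun h => lt_of_le_of_ne h.1 h.2)
  have hKBlt : ((PySem.List.pyRange 57 201).filter (fun d => decide (pvCntB sp d ≠ 0))).Pairwise (· < ·) :=
    (PySem.List.pairwise_lt_pyRange_one 57 201).filter _
  have hmemiff : ∀ k : Int,
      k ∈ PySem.Set.ofList ((PySem.List.sorted (pvConv (PySem.List.sorted sp (fun x => x) true)) (fun x => x)).filter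
        (fun m => decide (¬ (m < 57 ∨ m > 200))))
      ↔ k ∈ (PySem.List.pyRange 57 201).filter (fun d => decide (pvCntB sp d ≠ 0)) := by
    intro k
    rw [PySem.Set.mem_ofList]
    constructor
    · intro hk
      have hwin : 57 ≤ k ∧ k ≤ 200 := by
        have := (List.mem_filter.mp hk).2
        simp at this
        omega
      have hcnt : ((PySem.List.sorted (pvConv (PySem.List.sorted sp (fun x => x) true)) (fun x => x)).filter
          (fun m => decide (¬ (m < 57 ∨ m > 200)))).count k ≠ 0 :=
        Nat.pos_iff_ne_zero.mp (List.count_pos_iff.mpr hk)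
      apply List.mem_filter.mpr
      refine ⟨PySem.List.mem_pyRange_one.mpr ⟨hwin.1, by omega⟩, ?_⟩
      simp only [decide_eq_true_eq]
      rw [pvMainCount sp k hwin.1 hwin.2]
      intro h
      exact hcnt (Int.natCast_eq_zero.mp h)
    · intro hkB
      obtain ⟨hkr, hkc⟩ := List.mem_filter.mp hkB
      have hwin := PySem.List.mem_pyRange_one.mp hkr
      have hcnt : pvCntB sp k ≠ 0 := by simpa using hkc
      rw [pvMainCount sp k hwin.1 (by omega)] at hcnt
      have hne : ((PySem.List.sorted (pvConv (PySem.List.sorted sp (fun x => x) true)) (fun x => x)).filter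
          (fun m => decide (¬ (m < 57 ∨ m > 200)))).count k ≠ 0 := by
        intro h
        rw [h] at hcnt
        exact hcnt rfl
      exact List.count_pos_iff.mp (Nat.pos_of_ne_zero hne)
  have hKeq : PySem.Set.ofList ((PySem.List.sorted (pvConv (PySem.List.sorted sp (fun x => x) true)) (fun x => x)).filter
        (fun m => decide (¬ (m < 57 ∨ m > 200))))
      = (PySem.List.pyRange 57 201).filter (fun d => decide (pvCntB sp d ≠ 0)) := by
    have hperm : (PySem.Set.ofList ((PySem.List.sorted (pvConv (PySem.List.sorted sp (fun x => x) true)) (fun x => x)).filter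
        (fun m => decide (¬ (m < 57 ∨ m > 200))))).Perm
        ((PySem.List.pyRange 57 201).filter (fun d => decide (pvCntB sp d ≠ 0))) := by
      rw [List.perm_ext_iff_of_nodup (PySem.Set.nodup_ofList _)
        (hKBlt.imp ne_of_lt)]
      exact hmemiff
    exact List.Perm.eq_of_pairwise
      (fun a b _ _ h1 h2 => absurd h2 (lt_asymm h1)) hKAlt hKBlt hperm
  rw [PySem.Dict.items_counter, hKeq]
  apply List.map_congr_left
  intro k hk
  have hwin := PySem.List.mem_pyRange_one.mp (List.mem_filter.mp hk).1
  rw [pvMainCount sp k hwin.1 (by omega)]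

-- ===== VERDICT (by name: the statement is the Claim_ definition above) =====
theorem CorrectedAAList_spec : Claim_equal_CorrectedAAList := by
  intro sp M _
  unfold Spec_CorrectedAAList
  show CorrectedAAList sp M = CorrectedAAList_alt sp M
  simp only [CorrectedAAList, CorrectedAAList_alt, ge_iff_le]
  rw [pvConv_port]
  have hrf := pvRemoveFold (fun m => m < 57 ∨ m > 200)
    (PySem.List.sorted (pvConv (PySem.List.sorted sp (fun x => x) true)) (fun x => x))
    (PySem.List.sorted (pvConv (PySem.List.sorted sp (fun x => x) true)) (fun x => x))
    (List.Perm.refl _)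
  beta_reduce at hrf
  rw [hrf, pvCountFold ((PySem.List.sorted (pvConv (PySem.List.sorted sp (fun x => x) true)) (fun x => x)).filter (fun m => decide (¬ (m < 57 ∨ m > 200))))]
  rw [PySem.Dict.foldl_insert_getD_add_one_eq_counter]
  have hfun : (fun (cnt : PySem.Dict Int Int) (d : Int) =>
      if (PySem.Dict.counter sp).items.foldl
          (fun c p => c + p.2 * (PySem.Dict.counter sp).getD (p.1 - d) 0) (0 : Int) ≠ 0
      then cnt.insert d ((PySem.Dict.counter sp).items.foldl
          (fun c p => c + p.2 * (PySem.Dict.counter sp).getD (p.1 - d) 0) (0 : Int))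
      else cnt)
      = (fun (cnt : PySem.Dict Int Int) (d : Int) =>
        if pvCntB sp d ≠ 0 then cnt.insert d (pvCntB sp d) else cnt) := by
    funext cnt d
    have hc : (PySem.Dict.counter sp).items.foldl
        (fun c p => c + p.2 * (PySem.Dict.counter sp).getD (p.1 - d) 0) (0 : Int)
        = pvCntB sp d := by
      rw [PySem.List.foldl_add, PySem.Dict.items_counter, List.map_map]
      simp only [pvCntB, zero_add]
      apply congrArg List.sum
      apply List.map_congr_left
      intro v _
      simp only [Function.comp_apply]
      rw [PySem.Dict.getD_counter]
    rw [hc]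
  rw [hfun]
  have hBitems := pvInsFold (pvCntB sp) (PySem.List.pyRange 57 201) PySem.Dict.empty
    (fun d _ => rfl) (PySem.List.nodup_pyRange_one 57 201)
  have hdicts : (PySem.Dict.counter ((PySem.List.sorted (pvConv (PySem.List.sorted sp (fun x => x) true)) (fun x => x)).filter (fun m => decide (¬ (m < 57 ∨ m > 200)))))
      = (PySem.List.pyRange 57 201).foldl
        (fun cnt d => if pvCntB sp d ≠ 0 then cnt.insert d (pvCntB sp d) else cnt)
        PySem.Dict.empty := by
    apply PySem.Dict.ext
    rw [hBitems, pvItemsEq sp]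
    rfl
  rw [← hdicts]
  have hnd : (((PySem.Dict.counter ((PySem.List.sorted (pvConv (PySem.List.sorted sp (fun x => x) true)) (fun x => x)).filter (fun m => decide (¬ (m < 57 ∨ m > 200))))).items).map Prod.fst).Nodup := by
    rw [PySem.Dict.items_counter, List.map_map]
    have hid : (Prod.fst ∘ fun k : Int => (k, ((((PySem.List.sorted (pvConv (PySem.List.sorted sp (fun x => x) true)) (fun x => x)).filter (fun m => decide (¬ (m < 57 ∨ m > 200)))).count k : Nat) : Int))) = fun k => k := rfl
    rw [hid, List.map_id']
    exact PySem.Set.nodup_ofList ((PySem.List.sorted (pvConv (PySem.List.sorted sp (fun x => x) true)) (fun x => x)).filter (fun m => decide (¬ (m < 57 ∨ m > 200))))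
  by_cases hI : (PySem.Dict.counter ((PySem.List.sorted (pvConv (PySem.List.sorted sp (fun x => x) true)) (fun x => x)).filter (fun m => decide (¬ (m < 57 ∨ m > 200))))).items = []
  · have hkeys : (PySem.Dict.counter ((PySem.List.sorted (pvConv (PySem.List.sorted sp (fun x => x) true)) (fun x => x)).filter (fun m => decide (¬ (m < 57 ∨ m > 200))))).keys = [] := by
      show List.map (fun x => x.1) (PySem.Dict.counter ((PySem.List.sorted (pvConv (PySem.List.sorted sp (fun x => x) true)) (fun x => x)).filter (fun m => decide (¬ (m < 57 ∨ m > 200))))).items = []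
      rw [hI]
      rfl
    rw [hI, hkeys]
    rfl
  · have hisE : (PySem.Dict.counter ((PySem.List.sorted (pvConv (PySem.List.sorted sp (fun x => x) true)) (fun x => x)).filter (fun m => decide (¬ (m < 57 ∨ m > 200))))).items.isEmpty = false := by
      simpa using hI
    rw [hisE, if_neg Bool.false_ne_true]
    rw [pvKeysFold (PySem.Dict.counter ((PySem.List.sorted (pvConv (PySem.List.sorted sp (fun x => x) true)) (fun x => x)).filter (fun m => decide (¬ (m < 57 ∨ m > 200))))) hnd]
    set V := (PySem.Dict.counter ((PySem.List.sorted (pvConv (PySem.List.sorted sp (fun x => x) true)) (fun x => x)).filter (fun m => decide (¬ (m < 57 ∨ m > 200))))).values with hV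
    have hVne : V ≠ [] := by
      rw [hV]
      simp only [PySem.Dict.values, ne_eq, List.map_eq_nil_iff]
      exact hI
    set SLs := PySem.List.sorted V (fun x => x) true with hSLs
    set S := PySem.List.sorted (PySem.Set.ofList V) (fun x => x) true with hS
    have hslv : SLs.Perm V := PySem.List.sorted_perm V (fun x => x) true
    have hofperm : (PySem.Set.ofList SLs).Perm (PySem.Set.ofList V) := by
      rw [List.perm_ext_iff_of_nodup (PySem.Set.nodup_ofList _) (PySem.Set.nodup_ofList _)]
      intro a
      rw [PySem.Set.mem_ofList, PySem.Set.mem_ofList]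
      exact hslv.mem_iff
    have hSperm : S.Perm (PySem.Set.ofList SLs) :=
      (PySem.List.sorted_perm _ _ _).trans hofperm.symm
    have hSnd : S.Nodup :=
      ((PySem.List.sorted_perm (PySem.Set.ofList V) (fun x => x) true).symm).nodup
        (PySem.Set.nodup_ofList V)
    have hSdesc : S.Pairwise (· > ·) := by
      have h1 := PySem.List.sorted_pairwise_rev (PySem.Set.ofList V) (fun x => x)
      rw [← hS] at h1
      exact (h1.and hSnd).imp (fun h => lt_of_le_of_ne h.1 (Ne.symm h.2))
    have hSne : S ≠ [] := by
      rw [hS, Ne, PySem.List.sorted_eq_nil_iff]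
      intro h
      rcases List.exists_mem_of_ne_nil V hVne with ⟨v, hv⟩
      have : v ∈ PySem.Set.ofList V := (PySem.Set.mem_ofList V v).mpr hv
      rw [h] at this
      cases this
    have hscoreset : PySem.List.sorted (PySem.Set.ofList SLs) (fun x => x) true = S :=
      PySem.List.sorted_rev_eq_of_perm_of_pairwise_gt (PySem.Set.ofList SLs) S
        (fun x => x) hSperm hSdesc
    rw [hscoreset, pvCountFold SLs, PySem.List.pyGetD_neg_one S 0 hSne]
    have hZC : (if (aLoopZC (PySem.Dict.counter SLs) M S 0).2 ≠ (aLoopZC (PySem.Dict.counter SLs) M S 0).1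
        then (aLoopZC (PySem.Dict.counter SLs) M S 0).1
        else (aLoopZC (PySem.Dict.counter SLs) M S 0).2)
        = (aLoopZC (PySem.Dict.counter SLs) M S 0).1 := by
      by_cases h : (aLoopZC (PySem.Dict.counter SLs) M S 0).2
          = (aLoopZC (PySem.Dict.counter SLs) M S 0).1
      · rw [if_neg (by simpa using h)]
        exact h
      · rw [if_pos h]
    rw [hZC]
    have hc : ∀ s ∈ S, (PySem.Dict.counter SLs).getD s 0 = (V.count s : Int) := by
      intro s _
      rw [PySem.Dict.getD_counter]
      exact_mod_cast congrArg (Nat.cast : Nat → Int) (hslv.count_eq s)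
    have h2 : ∀ v ∈ V, v ∈ S ∨ ∀ s ∈ S, s < v := by
      intro v hv
      exact Or.inl ((PySem.List.mem_sorted _ _ _ v).mpr ((PySem.Set.mem_ofList V v).mpr hv))
    have h3 : (0 : Int) = (V.countP (fun v => decide (∀ s ∈ S, s < v)) : Int) := by
      have hz : V.countP (fun v => decide (∀ s ∈ S, s < v)) = 0 := by
        apply List.countP_eq_zero.mpr
        intro v hv
        simp only [decide_eq_true_eq]
        intro hall
        exact absurd (hall v ((PySem.List.mem_sorted _ _ _ v).mpr
          ((PySem.Set.mem_ofList V v).mpr hv))) (lt_irrefl v)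
      rw [hz]
      rfl
    rw [pvSel V M (PySem.Dict.counter SLs) S 0 hSdesc hc h2 h3 hSne]
    rw [pvTakeFold ((V.countP (fun v => decide (bLoopThr V M S 0 (S.getLast hSne) ≤ v)) : Int))
      (PySem.List.sorted (PySem.Dict.counter ((PySem.List.sorted (pvConv (PySem.List.sorted sp (fun x => x) true)) (fun x => x)).filter (fun m => decide (¬ (m < 57 ∨ m > 200))))).items (fun t => t.2) true) 0 []]
    simp only [sub_zero, Int.toNat_natCast, List.nil_append]
    have hcp : V.countP (fun v => decide (bLoopThr V M S 0 (S.getLast hSne) ≤ v))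
        = (PySem.List.sorted (PySem.Dict.counter ((PySem.List.sorted (pvConv (PySem.List.sorted sp (fun x => x) true)) (fun x => x)).filter (fun m => decide (¬ (m < 57 ∨ m > 200))))).items (fun t => t.2) true).countP
            (fun q => decide (bLoopThr V M S 0 (S.getLast hSne) ≤ q.2)) := by
      have e1 : V.countP (fun v => decide (bLoopThr V M S 0 (S.getLast hSne) ≤ v))
          = (PySem.Dict.counter ((PySem.List.sorted (pvConv (PySem.List.sorted sp (fun x => x) true)) (fun x => x)).filter (fun m => decide (¬ (m < 57 ∨ m > 200))))).items.countP (fun q => decide (bLoopThr V M S 0 (S.getLast hSne) ≤ q.2)) := by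
        rw [hV]
        show ((PySem.Dict.counter ((PySem.List.sorted (pvConv (PySem.List.sorted sp (fun x => x) true)) (fun x => x)).filter (fun m => decide (¬ (m < 57 ∨ m > 200))))).items.map Prod.snd).countP _ = _
        rw [List.countP_map]
        rfl
      rw [e1]
      exact ((PySem.List.sorted_perm _ _ _).countP_eq _).symm
    rw [hcp]
    rw [pvTakeFilter (bLoopThr V M S 0 (S.getLast hSne)) _
      (PySem.List.sorted_pairwise_rev (PySem.Dict.counter ((PySem.List.sorted (pvConv (PySem.List.sorted sp (fun x => x) true)) (fun x => x)).filter (fun m => decide (¬ (m < 57 ∨ m > 200))))).items (fun t => t.2))]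
    apply PySem.List.sorted_eq_sorted_of_perm _ _ (fun x => x) (fun a b h => h)
    exact ((PySem.List.sorted_perm (PySem.Dict.counter ((PySem.List.sorted (pvConv (PySem.List.sorted sp (fun x => x) true)) (fun x => x)).filter (fun m => decide (¬ (m < 57 ∨ m > 200))))).items (fun t => t.2) true).filter
      (fun q => decide (bLoopThr V M S 0 (S.getLast hSne) ≤ q.2))).map Prod.fst
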